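-- pv_equiv track=rewrite | github.com/alaporta85/fanta3_0 | MANTRA code/MANTRA_functions.py | order_by_role
-- ===== SOURCE A (Python) =====
-- def order_by_role(list_of_tuples):
--
--     '''Order the players according to their roles. We do this because it is
--        much more efficient to deploy the players starting from positions which
--        are more advanced in the field (Pc, A...). Random deployment causes
--        errors.'''
--
--     reference = ['Pc', 'A', 'T', 'W', 'C', 'M', 'E', 'Dc', 'Dd', 'Ds']
--
--     final = []
--
--     for role in reference:
--         for player in list_of_tuples:
--             if player[2] == role:
--                 final.append(player)
--
--     return final
-- ===== SOURCE B (Python) =====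
-- def order_by_role(list_of_tuples):
--     reference = ['Pc', 'A', 'T', 'W', 'C', 'M', 'E', 'Dc', 'Dd', 'Ds']
--     buckets = {}
--     for player in list_of_tuples:
--         buckets.setdefault(player[2], []).append(player)
--     final = []
--     for role in reference:
--         final.extend(buckets.get(role, []))
--     return final
-- ===== Notes on version B (the rewrite author's own statement) =====
-- stated objective: faster
-- what changed: Replaces the per-role rescan of the whole input (10 passes) with a single grouping pass into a dict keyed by role plus one emission pass over the fixed reference list.
import Mathlib
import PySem

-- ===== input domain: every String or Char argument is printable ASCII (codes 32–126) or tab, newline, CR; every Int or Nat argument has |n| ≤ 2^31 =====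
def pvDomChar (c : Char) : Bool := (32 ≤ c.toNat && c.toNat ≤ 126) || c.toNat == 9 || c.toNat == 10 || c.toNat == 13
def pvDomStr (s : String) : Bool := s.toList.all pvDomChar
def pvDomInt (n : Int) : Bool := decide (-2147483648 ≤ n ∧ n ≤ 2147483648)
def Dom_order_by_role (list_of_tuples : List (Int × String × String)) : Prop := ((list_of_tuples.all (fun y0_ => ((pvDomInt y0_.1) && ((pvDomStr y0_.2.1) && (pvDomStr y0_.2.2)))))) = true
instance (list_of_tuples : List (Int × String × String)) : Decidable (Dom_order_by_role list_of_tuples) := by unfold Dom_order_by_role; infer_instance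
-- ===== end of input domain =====

-- B replaces A's per-role rescan of the input with one grouping pass into a dict keyed by role
-- plus one emission pass over the fixed reference list (objective: faster by a constant factor).

-- ===== PORT A =====
def pvReference : List String := ["Pc", "A", "T", "W", "C", "M", "E", "Dc", "Dd", "Ds"]

def order_by_role (list_of_tuples : List (Int × String × String)) : List (Int × String × String) :=
  pvReference.foldl (fun final role =>
    list_of_tuples.foldl (fun final player =>
      if player.2.2 == role then final ++ [player] else final) final) []

-- ===== PORT B =====
def pvReferenceAlt : List String := ["Pc", "A", "T", "W", "C", "M", "E", "Dc", "Dd", "Ds"]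

def pvBuckets (list_of_tuples : List (Int × String × String)) :
    PySem.Dict String (List (Int × String × String)) :=
  list_of_tuples.foldl (fun d player =>
    d.insert player.2.2 (d.getD player.2.2 [] ++ [player])) PySem.Dict.empty

def order_by_role_alt (list_of_tuples : List (Int × String × String)) : List (Int × String × String) :=
  let buckets := pvBuckets list_of_tuples
  pvReferenceAlt.foldl (fun final role => final ++ buckets.getD role []) []

-- ===== PRECONDITION & SPEC =====
def Spec_order_by_role (list_of_tuples : List (Int × String × String)) (out : List (Int × String × String)) : Prop := out = order_by_role_alt list_of_tuples
instance (list_of_tuples : List (Int × String × String)) (out : List (Int × String × String)) : Decidable (Spec_order_by_role list_of_tuples out) := by unfold Spec_order_by_role; infer_instance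

-- ===== CLAIM (what is proved, stated in full; the proofs are below) =====
def Claim_equal_order_by_role : Prop := ∀ (list_of_tuples : List (Int × String × String)), Dom_order_by_role list_of_tuples → Spec_order_by_role list_of_tuples (order_by_role list_of_tuples)

-- ===== LEMMAS AND PROOFS =====

-- The bucket built by B's grouping pass holds, for each role, exactly the players of that role
-- in input order.
theorem pvBuckets_getD (l : List (Int × String × String))
    (d : PySem.Dict String (List (Int × String × String))) (r : String) :
    (l.foldl (fun d player =>
        d.insert player.2.2 (d.getD player.2.2 [] ++ [player])) d).getD r []
      = d.getD r [] ++ l.filter (fun p => p.2.2 == r) := by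
  induction l generalizing d with
  | nil => simp [List.filter]
  | cons p l ih =>
      simp only [List.foldl_cons, List.filter]
      rw [ih]
      by_cases h : p.2.2 = r
      · subst h
        simp
      · have hb : (p.2.2 == r) = false := by simp [h]
        have h' : ¬ r = p.2.2 := fun hr => h hr.symm
        rw [PySem.Dict.getD_insert]
        simp [hb, h']

-- A's inner scan over the input for one role is exactly the filter of that role.
theorem order_by_role_inner (l : List (Int × String × String)) (acc : List (Int × String × String))
    (r : String) :
    l.foldl (fun final player => if player.2.2 == r then final ++ [player] else final) acc
      = acc ++ l.filter (fun p => p.2.2 == r) :=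
  PySem.List.foldl_append_if_eq_filter _ _ _

-- ===== VERDICT (by name: the statement is the Claim_ definition above) =====
theorem order_by_role_spec : Claim_equal_order_by_role := by
  intro l _
  show order_by_role l = order_by_role_alt l
  unfold order_by_role order_by_role_alt pvBuckets
  have href : pvReferenceAlt = pvReference := rfl
  rw [href]
  have hfun : (fun (final : List (Int × String × String)) (role : String) =>
      l.foldl (fun final player => if player.2.2 == role then final ++ [player] else final) final)
    = (fun final role => final ++
        (l.foldl (fun d player =>
          d.insert player.2.2 (d.getD player.2.2 [] ++ [player])) PySem.Dict.empty).getD role []) := by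
    funext final role
    rw [order_by_role_inner, pvBuckets_getD]
    simp [PySem.Dict.empty, PySem.Dict.getD, PySem.Dict.get?]
  rw [hfun]
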